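-- pv_equiv track=rewrite | github.com/jsnider3/JavaWorkspace | Competitive/Python/hacklib.py | fillings
-- ===== SOURCE A (Python) =====
-- def fillings(heights):
--   ''' In a list of ints, how much must be added
--       to ensure that no element of an array is a local
--       minima. '''
--   count = 0
--   if len(heights) > 2:
--     leftmax = [0]
--     for height in heights:
--       leftmax.append(max(leftmax[-1], height))
--     rightmax = [0]
--     for height in reversed(heights):
--       rightmax.append(max(rightmax[-1], height))
--     rightmax = list(reversed(rightmax))
--     for ind in range(len(heights)):
--       count += max(min(leftmax[ind], rightmax[ind]) - heights[ind], 0)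
--   return count
-- ===== SOURCE B (Python) =====
-- def fillings(heights):
--   ''' In a list of ints, how much must be added
--       to ensure that no element of an array is a local
--       minima. '''
--   if len(heights) <= 2:
--     return 0
--   # the implicit 0 floor of the task = two virtual walls of height 0
--   hs = [0] + heights + [0]
--   l, r = 0, len(hs) - 1
--   leftmax = rightmax = count = 0
--   while l < r:
--     if hs[l] < hs[r]:
--       leftmax = max(leftmax, hs[l])
--       count += leftmax - hs[l]
--       l += 1
--     else:
--       rightmax = max(rightmax, hs[r])
--       count += rightmax - hs[r]
--       r -= 1
--   return count
-- ===== Notes on version B (the rewrite author's own statement) =====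
-- stated objective: faster
-- what changed: Replaces the two precomputed prefix/suffix-maximum arrays and the third summing pass by the classic two-pointer trapping-water scan over the list padded with two zero walls (which encode A's 0 floor), maintaining only two scalar running maxima.
import Mathlib
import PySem

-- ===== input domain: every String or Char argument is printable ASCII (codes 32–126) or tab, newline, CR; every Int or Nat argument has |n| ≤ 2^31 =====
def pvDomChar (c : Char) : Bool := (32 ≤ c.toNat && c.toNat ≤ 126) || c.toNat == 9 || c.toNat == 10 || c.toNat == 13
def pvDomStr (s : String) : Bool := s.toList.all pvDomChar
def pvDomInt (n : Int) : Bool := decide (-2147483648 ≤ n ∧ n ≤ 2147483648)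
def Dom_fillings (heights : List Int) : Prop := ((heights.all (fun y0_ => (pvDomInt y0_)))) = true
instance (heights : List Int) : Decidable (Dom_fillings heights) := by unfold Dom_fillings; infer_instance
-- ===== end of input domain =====

-- B replaces A's two precomputed prefix/suffix-maximum arrays and third summing pass by the
-- classic two-pointer scan over the list padded with two zero walls (A's 0 floor); measured faster by a constant factor.


-- ===== PORT A =====
-- leftmax[-1] in Python is applied only to a nonempty list (it starts as [0]), so pyGetD with
-- default 0 is exact here; all other indices are provably in range, so pyGetD is exact too.
def fillings (heights : List Int) : Int :=
  if 2 < heights.length then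
    let leftmax := heights.foldl (fun acc h => acc ++ [max (PySem.List.pyGetD acc (-1) 0) h]) [0]
    let rightmax := (heights.reverse.foldl (fun acc h => acc ++ [max (PySem.List.pyGetD acc (-1) 0) h]) [0]).reverse
    (PySem.List.pyRange 0 (heights.length : Int) 1).foldl
      (fun count ind =>
        count + max (min (PySem.List.pyGetD leftmax ind 0) (PySem.List.pyGetD rightmax ind 0)
                      - PySem.List.pyGetD heights ind 0) 0) 0
  else 0

-- ===== PORT B =====
-- the while-loop of Source B; l and r are list indices, always in [0, hs.length), so getD is exact.
def tpGo (hs : List Int) (l r : Nat) (leftmax rightmax count : Int) : Int :=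
  if l < r then
    if hs.getD l 0 < hs.getD r 0 then
      tpGo hs (l+1) r (max leftmax (hs.getD l 0)) rightmax
        (count + (max leftmax (hs.getD l 0) - hs.getD l 0))
    else
      tpGo hs l (r-1) leftmax (max rightmax (hs.getD r 0))
        (count + (max rightmax (hs.getD r 0) - hs.getD r 0))
  else count
termination_by r - l
decreasing_by all_goals omega

def fillings_alt (heights : List Int) : Int :=
  if heights.length ≤ 2 then 0
  else
    let hs := 0 :: (heights ++ [0])
    tpGo hs 0 (hs.length - 1) 0 0 0

-- ===== PRECONDITION & SPEC =====
def Spec_fillings (heights : List Int) (out : Int) : Prop := out = fillings_alt heights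
instance (heights : List Int) (out : Int) : Decidable (Spec_fillings heights out) := by unfold Spec_fillings; infer_instance

-- ===== CLAIM (what is proved, stated in full; the proofs are below) =====
def Claim_equal_fillings : Prop := ∀ (heights : List Int), Dom_fillings heights → Spec_fillings heights (fillings heights)

-- ===== LEMMAS AND PROOFS =====

-- maximum of a list with a floor of 0 (the floor A's seed element 0 introduces)
def maxf (xs : List Int) : Int := xs.foldr max 0

-- the amount A's third pass adds at index i
def contrib (hs : List Int) (i : Nat) : Int :=
  max (min (maxf (hs.take i)) (maxf (hs.drop i)) - hs.getD i 0) 0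

-- invariant of the two-pointer loop: the left pointer has moved only because a
-- positive element lies at or to the right of it
def Qinv (hs : List Int) (l : Nat) : Prop :=
  l = 0 ∨ ∃ p, l ≤ p ∧ p < hs.length ∧ 0 < hs.getD p 0

theorem maxf_nil : maxf [] = 0 := rfl

theorem maxf_cons (a : Int) (xs : List Int) : maxf (a :: xs) = max a (maxf xs) := rfl

theorem maxf_nonneg (xs : List Int) : 0 ≤ maxf xs := by
  induction xs with
  | nil => simp [maxf]
  | cons a t ih => simp only [maxf, List.foldr] at *; omega

theorem maxf_append (xs ys : List Int) : maxf (xs ++ ys) = max (maxf xs) (maxf ys) := by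
  induction xs with
  | nil => have := maxf_nonneg ys; simp [maxf] at *; omega
  | cons a t ih => simp only [List.cons_append, maxf_cons, ih]; omega

theorem maxf_reverse (xs : List Int) : maxf xs.reverse = maxf xs := by
  induction xs with
  | nil => rfl
  | cons a t ih =>
    rw [List.reverse_cons, maxf_append, ih, maxf_cons, maxf_cons, maxf_nil]
    have := maxf_nonneg t; omega

theorem le_maxf (xs : List Int) (a : Int) (h : a ∈ xs) : a ≤ maxf xs := by
  induction xs with
  | nil => simp at h
  | cons b t ih =>
    rcases List.mem_cons.mp h with rfl | h
    · rw [maxf_cons]; omega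
    · have := ih h; rw [maxf_cons]; omega

-- getD of a later index is bounded by maxf of a drop
theorem getD_le_maxf_drop (hs : List Int) (m p : Nat) (hmp : m ≤ p) (hp : p < hs.length) :
    hs.getD p 0 ≤ maxf (hs.drop m) := by
  have h1 : p - m < (hs.drop m).length := by simp; omega
  have h2 : hs.getD p 0 = (hs.drop m)[p - m] := by
    rw [List.getD_eq_getElem _ _ hp, List.getElem_drop]
    congr 1; omega
  rw [h2]; exact le_maxf _ _ (List.getElem_mem h1)

theorem drop_getD_cons (hs : List Int) (l : Nat) (h : l < hs.length) :
    hs.drop l = hs.getD l 0 :: hs.drop (l+1) := by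
  rw [List.getD_eq_getElem _ _ h]; exact List.drop_eq_getElem_cons h

theorem seg_snoc (hs : List Int) (l r : Nat) (hlr : l ≤ r) (hr : r < hs.length) :
    (hs.drop l).take (r+1-l) = (hs.drop l).take (r-l) ++ [hs.getD r 0] := by
  rw [show r+1-l = (r-l)+1 from by omega, List.take_add_one]
  congr 1
  rw [List.getElem?_drop, show l + (r - l) = r from by omega,
    List.getElem?_eq_getElem hr, List.getD_eq_getElem _ _ hr]
  rfl

theorem build_spec (xs : List Int) :
    xs.foldl (fun acc h => acc ++ [max (PySem.List.pyGetD acc (-1) 0) h]) [0]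
      = (List.range (xs.length + 1)).map (fun i => maxf (xs.take i)) := by
  induction xs using List.reverseRecOn with
  | nil => simp [maxf]
  | append_singleton xs a ih =>
    rw [List.foldl_append, ih]
    -- left side: one more step applied to map g (range (n+1))
    have hsplit : (List.range (xs.length + 1)).map (fun i => maxf (xs.take i))
        = (List.range xs.length).map (fun i => maxf (xs.take i)) ++ [maxf xs] := by
      rw [List.range_succ, List.map_append]; simp
    rw [List.foldl_cons, List.foldl_nil, hsplit, PySem.List.pyGetD_neg_one_append_singleton]
    -- right side
    have hlen : (xs ++ [a]).length + 1 = (xs.length + 1) + 1 := by simp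
    rw [hlen, List.range_succ, List.map_append, List.range_succ, List.map_append]
    have h1 : ∀ i ∈ List.range xs.length, maxf ((xs ++ [a]).take i) = maxf (xs.take i) := by
      intro i hi
      rw [List.take_append_of_le_length (by simp at hi; omega)]
    have h2 : maxf ((xs ++ [a]).take xs.length) = maxf xs := by
      rw [List.take_append_of_le_length (le_refl _), List.take_length]
    have h3 : maxf ((xs ++ [a]).take (xs.length + 1)) = max (maxf xs) a := by
      rw [List.take_of_length_le (by simp), maxf_append, maxf_cons, maxf_nil]
      have := maxf_nonneg xs; omega
    rw [List.map_congr_left h1]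
    simp only [List.map_singleton, h2, h3, List.append_assoc]

theorem tpGo_spec (hs : List Int) (l r : Nat) (lm rm c : Int)
    (hlr : l ≤ r) (hrlen : r < hs.length) (h0 : 0 ≤ hs.getD 0 0)
    (hlm : lm = maxf (hs.take l)) (hrm : rm = maxf (hs.drop (r+1)))
    (hseg1 : lm ≤ maxf ((hs.drop l).take (r+1-l)))
    (hseg2 : rm ≤ maxf ((hs.drop l).take (r+1-l)))
    (hQ : Qinv hs l) :
    tpGo hs l r lm rm c = c + ((List.range' l (r+1-l)).map (contrib hs)).sum := by
  by_cases hlr' : l < r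
  case neg =>
    have hl : l = r := by omega
    subst hl
    rw [tpGo, if_neg (by omega), show l+1-l = 1 from by omega]
    simp only [List.range'_one, List.map_cons, List.map_nil, List.sum_cons, List.sum_nil, add_zero]
    have hllen : l < hs.length := hrlen
    have hdrop := drop_getD_cons hs l hllen
    have hsegeq : (hs.drop l).take 1 = [hs.getD l 0] := by rw [hdrop]; rfl
    rw [show l+1-l = 1 from by omega, hsegeq, maxf_cons, maxf_nil] at hseg1 hseg2
    have hR : maxf (hs.drop l) = max (hs.getD l 0) rm := by
      rw [hdrop, maxf_cons, hrm]
    have hnn := maxf_nonneg (hs.take l)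
    have hnn2 := maxf_nonneg (hs.drop (l+1))
    -- derive: min lm R ≤ getD l
    have hkey : min lm (maxf (hs.drop l)) ≤ hs.getD l 0 := by
      rcases hQ with rfl | ⟨p, hp1, hp2, hp3⟩
      · rw [List.take_zero, maxf_nil] at hlm
        omega
      · rcases Nat.eq_or_lt_of_le hp1 with rfl | hpl
        · omega
        · have := getD_le_maxf_drop hs (l+1) p (by omega) hp2
          rw [← hrm] at this
          omega
    unfold contrib
    omega
  case pos =>
    have hllen : l < hs.length := by omega
    have hdropl := drop_getD_cons hs l hllen
    have hdropr := drop_getD_cons hs r hrlen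
    have hsnoc := seg_snoc hs l r hlr hrlen
    have hsegcons : (hs.drop l).take (r+1-l)
        = hs.getD l 0 :: (hs.drop (l+1)).take (r-l) := by
      rw [hdropl, show r+1-l = (r-l)+1 from by omega, List.take_succ_cons]
    have hnnlm : 0 ≤ lm := hlm ▸ maxf_nonneg _
    have hnnrm : 0 ≤ rm := hrm ▸ maxf_nonneg _
    rw [tpGo, if_pos hlr']
    by_cases hcmp : hs.getD l 0 < hs.getD r 0
    · rw [if_pos hcmp]
      -- facts about the shrunken segment
      have hseq : r+1-(l+1) = r-l := by omega
      have hsnoc' := seg_snoc hs (l+1) r (by omega) hrlen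
      rw [hseq] at hsnoc'
      have hhr_seg' : hs.getD r 0 ≤ maxf ((hs.drop (l+1)).take (r-l)) := by
        rw [hsnoc', maxf_append, maxf_cons, maxf_nil]; omega
      have hsegval : maxf ((hs.drop l).take (r+1-l))
          = max (hs.getD l 0) (maxf ((hs.drop (l+1)).take (r-l))) := by
        rw [hsegcons, maxf_cons]
      have hnns' := maxf_nonneg ((hs.drop (l+1)).take (r-l))
      have ihres := tpGo_spec hs (l+1) r (max lm (hs.getD l 0)) rm
        (c + (max lm (hs.getD l 0) - hs.getD l 0))
        (by omega) hrlen h0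
        (by rw [List.take_add_one, List.getElem?_eq_getElem hllen, hlm]
            have hge : hs[l] = hs.getD l 0 := (List.getD_eq_getElem hs 0 hllen).symm
            rw [maxf_append]
            simp only [Option.toList, maxf_cons, maxf_nil, hge]
            have := maxf_nonneg (hs.take l); omega)
        hrm
        (by rw [hseq]; rw [hsegval] at hseg1; omega)
        (by rw [hseq]; rw [hsegval] at hseg2; omega)
        (by refine Or.inr ?_
            rcases hQ with rfl | ⟨p, hp1, hp2, hp3⟩
            · exact ⟨r, by omega, hrlen, by omega⟩
            · rcases Nat.eq_or_lt_of_le hp1 with rfl | hpl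
              · exact ⟨r, by omega, hrlen, by omega⟩
              · exact ⟨p, by omega, hp2, hp3⟩)
      rw [ihres, hseq]
      -- now arithmetic on the sums
      rw [show r+1-l = (r-l)+1 from by omega, List.range'_succ, List.map_cons, List.sum_cons]
      have hcl : contrib hs l = max lm (hs.getD l 0) - hs.getD l 0 := by
        unfold contrib
        have hsplit : hs.drop l = (hs.drop l).take (r+1-l) ++ hs.drop (r+1) := by
          conv_lhs => rw [← List.take_append_drop (r+1-l) (hs.drop l)]
          rw [List.drop_drop, show l+(r+1-l) = r+1 from by omega]
        have hR : maxf (hs.drop l) = max (maxf ((hs.drop l).take (r+1-l))) rm := by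
          conv_lhs => rw [hsplit]
          rw [maxf_append, hrm]
        have hhr_seg : hs.getD r 0 ≤ maxf ((hs.drop l).take (r+1-l)) := by
          rw [hsnoc, maxf_append, maxf_cons, maxf_nil]; omega
        rw [← hlm]
        omega
      rw [hcl]; ring
    · rw [if_neg hcmp]
      have hge : hs.getD r 0 ≤ hs.getD l 0 := by omega
      have hseg2cons : (hs.drop l).take (r-l)
          = hs.getD l 0 :: (hs.drop (l+1)).take (r-l-1) := by
        conv_lhs => rw [hdropl, show r-l = (r-l-1)+1 from by omega]
        rw [List.take_succ_cons]
      have hhl_seg2 : hs.getD l 0 ≤ maxf ((hs.drop l).take (r-l)) := by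
        rw [hseg2cons, maxf_cons]; omega
      have hnns2 := maxf_nonneg ((hs.drop l).take (r-l))
      have hsegval : maxf ((hs.drop l).take (r+1-l))
          = max (maxf ((hs.drop l).take (r-l))) (max (hs.getD r 0) 0) := by
        rw [hsnoc, maxf_append, maxf_cons, maxf_nil]
      have hdropr_eq : maxf (hs.drop r) = max (hs.getD r 0) rm := by
        rw [hdropr, maxf_cons, hrm]
      have ihres := tpGo_spec hs l (r-1) lm (max rm (hs.getD r 0))
        (c + (max rm (hs.getD r 0) - hs.getD r 0))
        (by omega) (by omega) h0 hlm
        (by rw [show r-1+1 = r from by omega, hdropr_eq]; omega)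
        (by rw [show r-1+1-l = r-l from by omega]; rw [hsegval] at hseg1; omega)
        (by rw [show r-1+1-l = r-l from by omega]; rw [hsegval] at hseg2; omega)
        hQ
      rw [ihres, show r-1+1-l = r-l from by omega]
      rw [show r+1-l = (r-l)+1 from by omega, List.range'_1_concat, List.map_append,
        List.sum_append, show l + (r-l) = r from by omega]
      have hcr : contrib hs r = max rm (hs.getD r 0) - hs.getD r 0 := by
        unfold contrib
        have hL : maxf (hs.take r) = max lm (maxf ((hs.drop l).take (r-l))) := by
          rw [show r = l + (r-l) from by omega, List.take_add, maxf_append, hlm,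
            show l + (r-l) = r from by omega]
        rw [hL, hdropr_eq]
        have hrm_seg2 : rm ≤ maxf ((hs.drop l).take (r-l)) := by
          rw [hsegval] at hseg2; omega
        omega
      simp only [List.map_cons, List.map_nil, List.sum_cons, List.sum_nil]
      rw [hcr]
      ring
termination_by r - l
decreasing_by all_goals omega

theorem right_getD (xs : List Int) (i : Nat) (hi : i ≤ xs.length) :
    ((List.range (xs.reverse.length + 1)).map (fun j => maxf (xs.reverse.take j))).reverse.getD i 0
      = maxf (xs.drop i) := by
  have hlen : i < ((List.range (xs.reverse.length + 1)).map (fun j => maxf (xs.reverse.take j))).reverse.length := by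
    simp; omega
  rw [List.getD_eq_getElem _ _ hlen, List.getElem_reverse]
  rw [List.getElem_map, List.getElem_range]
  simp only [List.length_map, List.length_range, List.length_reverse]
  rw [show xs.length + 1 - 1 - i = xs.length - i from by omega, List.take_reverse,
    show xs.length - (xs.length - i) = i from by omega, maxf_reverse]

theorem A_eq (heights : List Int) (h : 2 < heights.length) :
    fillings heights = ((List.range heights.length).map (contrib heights)).sum := by
  unfold fillings
  rw [if_pos h]
  simp only [build_spec]
  rw [PySem.List.foldl_add, PySem.List.pyRange_zero_natCast, List.map_map, zero_add]
  apply congrArg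
  apply List.map_congr_left
  intro i hi
  rw [List.mem_range] at hi
  simp only [Function.comp]
  rw [PySem.List.pyGetD_natCast, PySem.List.pyGetD_natCast, PySem.List.pyGetD_natCast]
  rw [PySem.List.getD_map_range _ _ _ _ (by omega)]
  rw [right_getD heights i (by omega)]
  rfl

theorem contrib_zero (heights : List Int) :
    contrib (0 :: (heights ++ [0])) 0 = 0 := by
  unfold contrib
  have h1 := maxf_nonneg (0 :: (heights ++ [0]))
  simp only [List.take_zero, List.drop_zero, maxf_nil, List.getD_cons_zero]
  omega

theorem contrib_top (heights : List Int) :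
    contrib (0 :: (heights ++ [0])) (heights.length + 1) = 0 := by
  unfold contrib
  have hd : (0 :: (heights ++ [0])).drop (heights.length + 1) = [0] := by
    rw [List.drop_succ_cons, List.drop_append_of_le_length (le_refl _), List.drop_length,
      List.nil_append]
  have hg : (0 :: (heights ++ [0])).getD (heights.length + 1) 0 = 0 := by
    rw [List.getD_cons_succ, List.getD_eq_getElem _ _ (by simp),
      List.getElem_append_right (le_refl _)]
    simp
  rw [hd, hg, maxf_cons, maxf_nil]
  have := maxf_nonneg ((0 :: (heights ++ [0])).take (heights.length + 1))
  omega

theorem contrib_shift (heights : List Int) (i : Nat) (hi : i < heights.length) :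
    contrib (0 :: (heights ++ [0])) (i + 1) = contrib heights i := by
  unfold contrib
  have hA : maxf ((0 :: (heights ++ [0])).take (i+1)) = maxf (heights.take i) := by
    rw [List.take_succ_cons, List.take_append_of_le_length (by omega), maxf_cons]
    have := maxf_nonneg (heights.take i); omega
  have hB : maxf ((0 :: (heights ++ [0])).drop (i+1)) = maxf (heights.drop i) := by
    rw [List.drop_succ_cons, List.drop_append_of_le_length (by omega), maxf_append,
      maxf_cons, maxf_nil]
    have := maxf_nonneg (heights.drop i); omega
  have hg : (0 :: (heights ++ [0])).getD (i+1) 0 = heights.getD i 0 := by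
    rw [List.getD_cons_succ, List.getD_eq_getElem _ _ (by simp; omega),
      List.getElem_append_left hi, List.getD_eq_getElem _ _ hi]
  rw [hA, hB, hg]

theorem B_eq (heights : List Int) (h : 2 < heights.length) :
    fillings_alt heights = ((List.range heights.length).map (contrib heights)).sum := by
  unfold fillings_alt
  rw [if_neg (by omega)]
  have hlen : (0 :: (heights ++ [0])).length = heights.length + 2 := by simp
  rw [tpGo_spec (0 :: (heights ++ [0])) 0 ((0 :: (heights ++ [0])).length - 1) 0 0 0
    (by omega) (by omega) (by simp)
    (by simp [maxf_nil])
    (by rw [show (0 :: (heights ++ [0])).length - 1 + 1 = (0 :: (heights ++ [0])).length from by omega,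
          List.drop_length]; rfl)
    (maxf_nonneg _) (maxf_nonneg _) (Or.inl rfl)]
  rw [hlen, show heights.length + 2 - 1 + 1 - 0 = heights.length + 2 from by omega,
    ← List.range_eq_range']
  rw [List.range_succ, List.range_succ_eq_map, List.map_append, List.sum_append,
    List.map_cons, List.sum_cons, List.map_map, List.map_cons, List.map_nil, List.sum_cons,
    List.sum_nil, contrib_zero, contrib_top]
  have hmap : (List.range heights.length).map ((contrib (0 :: (heights ++ [0]))) ∘ Nat.succ)
      = (List.range heights.length).map (contrib heights) := by
    apply List.map_congr_left
    intro i hi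
    rw [List.mem_range] at hi
    simp only [Function.comp, Nat.succ_eq_add_one]
    exact contrib_shift heights i hi
  rw [hmap]
  ring

-- ===== VERDICT (by name: the statement is the Claim_ definition above) =====
theorem fillings_spec : Claim_equal_fillings := by
  intro heights _
  unfold Spec_fillings
  by_cases h : 2 < heights.length
  · rw [A_eq heights h, B_eq heights h]
  · have h2 : heights.length ≤ 2 := by omega
    simp [fillings, fillings_alt, h, h2]
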